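-- pv_equiv track=rewrite | github.com/kvanherck/aoc | 2021/19/p.py | findOffset
-- ===== SOURCE A (Python) =====
-- def diffVector(v1, v2):
-- 	x1, y1, z1 = v1
-- 	x2, y2, z2 = v2
-- 	return x1 - x2, y1 - y2, z1 - z2
--
-- def offsetVector(v, o):
-- 	x1, y1, z1 = v
-- 	x2, y2, z2 = o
-- 	return x1 + x2, y1 + y2, z1 + z2
--
-- def findOffset(s1, s2, threshold=12):
-- 	set1 = set(s1)
-- 	for b1 in s1:
-- 		for b2 in s2:
-- 			offset = diffVector(b1, b2)
-- 			s2o = []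
-- 			for b in s2:
-- 				s2o.append(offsetVector(b, offset))
-- 			set2 = set(s2o)
-- 			if len(set1 & set2) >= threshold:
-- 				return s2o, offset
-- 	return None, None
-- ===== SOURCE B (Python) =====
-- def findOffset(s1, s2, threshold=12):
--     # Histogram of diff-vectors over distinct beacons: counts[o] = |set1 & set(s2+o)|.
--     d1 = list(dict.fromkeys(s1))
--     d2 = list(dict.fromkeys(s2))
--     diffs = [(a[0] - b[0], a[1] - b[1], a[2] - b[2]) for a in d1 for b in d2]
--     counts = {}
--     for v in diffs:
--         counts[v] = counts.get(v, 0) + 1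
--     # First offset in A's pair order reaching threshold, via one flattened stream.
--     o = next((v for v in ((a[0] - b[0], a[1] - b[1], a[2] - b[2])
--                           for a in s1 for b in s2)
--               if counts.get(v, 0) >= threshold), None)
--     if o is None:
--         return None, None
--     return [(x + o[0], y + o[1], z + o[2]) for (x, y, z) in s2], o
-- ===== Notes on version B (the rewrite author's own statement) =====
-- stated objective: faster
-- what changed: Instead of rebuilding the translated beacon list and set intersection for every candidate pair (O(m) work per pair), B builds one histogram (Counter) of diff-vectors over the distinct beacons and then takes the first offset of the flattened pair-order diff stream whose count reaches the threshold, a single lookup per pair.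
import Mathlib
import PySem

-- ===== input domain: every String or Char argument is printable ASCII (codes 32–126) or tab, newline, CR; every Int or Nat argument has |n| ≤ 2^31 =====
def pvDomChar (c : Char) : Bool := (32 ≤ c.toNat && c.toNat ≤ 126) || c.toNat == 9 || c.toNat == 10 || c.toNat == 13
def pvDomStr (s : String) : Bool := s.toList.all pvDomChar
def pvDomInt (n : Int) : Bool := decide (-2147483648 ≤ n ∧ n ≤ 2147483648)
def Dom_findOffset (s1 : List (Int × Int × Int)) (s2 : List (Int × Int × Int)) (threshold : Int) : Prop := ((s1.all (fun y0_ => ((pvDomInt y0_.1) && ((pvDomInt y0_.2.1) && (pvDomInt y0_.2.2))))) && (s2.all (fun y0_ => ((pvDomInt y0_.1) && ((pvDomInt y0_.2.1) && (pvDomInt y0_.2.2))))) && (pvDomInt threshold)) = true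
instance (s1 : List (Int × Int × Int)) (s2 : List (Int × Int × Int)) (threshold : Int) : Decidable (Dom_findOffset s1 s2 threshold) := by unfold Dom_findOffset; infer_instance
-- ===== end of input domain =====

-- B replaces A's per-pair rebuild of the translated set and intersection by one diff-vector
-- histogram over the distinct beacons followed by a single scan of the flattened
-- pair-order diff stream (objective: faster).

-- ===== PORT A =====
def diffVector (v1 v2 : Int × Int × Int) : Int × Int × Int :=
  (v1.1 - v2.1, v1.2.1 - v2.2.1, v1.2.2 - v2.2.2)

def offsetVector (v o : Int × Int × Int) : Int × Int × Int :=
  (v.1 + o.1, v.2.1 + o.2.1, v.2.2 + o.2.2)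

-- inner 'for b2 in s2' loop with early return
def findOffsetInner (set1 : PySem.Set (Int × Int × Int)) (s2 : List (Int × Int × Int))
    (threshold : Int) (b1 : Int × Int × Int) :
    List (Int × Int × Int) → Option (List (Int × Int × Int) × (Int × Int × Int))
  | [] => none
  | b2 :: rest =>
    let offset := diffVector b1 b2
    let s2o := s2.foldl (fun acc b => acc ++ [offsetVector b offset]) []
    let set2 := PySem.Set.ofList s2o
    if threshold ≤ ((PySem.Set.inter set1 set2).length : Int) then some (s2o, offset)
    else findOffsetInner set1 s2 threshold b1 rest

-- outer 'for b1 in s1' loop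
def findOffsetOuter (set1 : PySem.Set (Int × Int × Int)) (s2 : List (Int × Int × Int))
    (threshold : Int) :
    List (Int × Int × Int) → Option (List (Int × Int × Int) × (Int × Int × Int))
  | [] => none
  | b1 :: rest =>
    match findOffsetInner set1 s2 threshold b1 s2 with
    | some r => some r
    | none => findOffsetOuter set1 s2 threshold rest

def findOffset (s1 : List (Int × Int × Int)) (s2 : List (Int × Int × Int)) (threshold : Int) :
    (Option (List (Int × Int × Int))) × (Option (Int × Int × Int)) :=
  match findOffsetOuter (PySem.Set.ofList s1) s2 threshold s1 with
  | some (s2o, offset) => (some s2o, some offset)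
  | none => (none, none)

-- ===== PORT B =====
def subv (a b : Int × Int × Int) : Int × Int × Int :=
  (a.1 - b.1, a.2.1 - b.2.1, a.2.2 - b.2.2)

def addv (a o : Int × Int × Int) : Int × Int × Int :=
  (a.1 + o.1, a.2.1 + o.2.1, a.2.2 + o.2.2)

def findOffset_alt (s1 : List (Int × Int × Int)) (s2 : List (Int × Int × Int)) (threshold : Int) :
    (Option (List (Int × Int × Int))) × (Option (Int × Int × Int)) :=
  -- diffs = [a - b for a in d1 for b in d2]  (d1/d2 = distinct beacons, first-occurrence order)
  let diffs := (PySem.Set.ofList s1).flatMap (fun a => (PySem.Set.ofList s2).map (fun b => subv a b))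
  -- counts[v] = counts.get(v, 0) + 1 over diffs
  let counts := diffs.foldl (fun d v => d.insert v (d.getD v 0 + 1)) PySem.Dict.empty
  -- next(v for v in flattened pair-order stream if counts.get(v, 0) >= threshold)
  match (s1.flatMap (fun a => s2.map (fun b => subv a b))).find?
      (fun v => decide (threshold ≤ counts.getD v 0)) with
  | some o => (some (s2.map (fun b => addv b o)), some o)
  | none => (none, none)

-- ===== PRECONDITION & SPEC =====
def Spec_findOffset (s1 : List (Int × Int × Int)) (s2 : List (Int × Int × Int)) (threshold : Int) (out : (Option (List (Int × Int × Int))) × (Option (Int × Int × Int))) : Prop := out = findOffset_alt s1 s2 threshold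
instance (s1 : List (Int × Int × Int)) (s2 : List (Int × Int × Int)) (threshold : Int) (out : (Option (List (Int × Int × Int))) × (Option (Int × Int × Int))) : Decidable (Spec_findOffset s1 s2 threshold out) := by unfold Spec_findOffset; infer_instance

-- ===== CLAIM (what is proved, stated in full; the proofs are below) =====
def Claim_equal_findOffset : Prop := ∀ (s1 : List (Int × Int × Int)) (s2 : List (Int × Int × Int)) (threshold : Int), Dom_findOffset s1 s2 threshold → Spec_findOffset s1 s2 threshold (findOffset s1 s2 threshold)

-- ===== LEMMAS AND PROOFS =====

lemma subv_eq_iff (b1 y o : Int × Int × Int) : subv b1 y = o ↔ y = subv b1 o := by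
  obtain ⟨x1, y1, z1⟩ := b1; obtain ⟨x2, y2, z2⟩ := y; obtain ⟨x3, y3, z3⟩ := o
  simp only [subv, Prod.mk.injEq]
  omega

lemma addv_eq_iff (b o x : Int × Int × Int) : addv b o = x ↔ b = subv x o := by
  obtain ⟨x1, y1, z1⟩ := b; obtain ⟨x2, y2, z2⟩ := o; obtain ⟨x3, y3, z3⟩ := x
  simp only [addv, subv, Prod.mk.injEq]
  omega

lemma count_map_subv (D2 : List (Int × Int × Int)) (hD2 : D2.Nodup) (b1 o : Int × Int × Int) :
    (D2.map (subv b1)).count o = if subv b1 o ∈ D2 then 1 else 0 := by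
  rw [List.count_eq_countP, List.countP_map]
  have h : D2.countP ((· == o) ∘ subv b1) = D2.countP (· == subv b1 o) := by
    apply List.countP_congr
    intro y _
    simp [subv_eq_iff]
  rw [h, ← List.count_eq_countP]
  split_ifs with hm
  · exact List.count_eq_one_of_mem hD2 hm
  · exact List.count_eq_zero_of_not_mem hm

-- B's histogram entry at o equals A's overlap count |set1 ∩ set(s2 + o)|
lemma counts_getD_eq_overlap (s1 s2 : List (Int × Int × Int)) (o : Int × Int × Int) :
    (((PySem.Set.ofList s1).flatMap
        (fun a => (PySem.Set.ofList s2).map (fun b => subv a b))).foldl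
        (fun d v => d.insert v (d.getD v 0 + 1)) PySem.Dict.empty).getD o 0
      = ((PySem.Set.inter (PySem.Set.ofList s1)
          (PySem.Set.ofList (s2.map (fun b => addv b o)))).length : Int) := by
  rw [PySem.Dict.getD_foldl_insert_add_one]
  have hmemB : ∀ x : Int × Int × Int,
      (x ∈ PySem.Set.ofList (s2.map (fun b => addv b o))) ↔ subv x o ∈ s2 := by
    intro x
    rw [PySem.Set.mem_ofList, List.mem_map]
    constructor
    · rintro ⟨b, hb, hba⟩; rw [addv_eq_iff] at hba; exact hba ▸ hb
    · intro h; exact ⟨subv x o, h, by rw [addv_eq_iff]⟩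
  have hA : (PySem.Set.inter (PySem.Set.ofList s1)
      (PySem.Set.ofList (s2.map (fun b => addv b o)))).length
      = (PySem.Set.ofList s1).countP (fun x => decide (subv x o ∈ s2)) := by
    show (List.filter _ _).length = _
    rw [← List.countP_eq_length_filter]
    apply List.countP_congr
    intro x _
    simp only [PySem.Set.contains_eq_listContains, List.contains_iff_mem, decide_eq_true_eq]
    exact hmemB x
  have hB : ((PySem.Set.ofList s1).flatMap
        (fun a => (PySem.Set.ofList s2).map (fun b => subv a b))).count o
      = (PySem.Set.ofList s1).countP (fun x => decide (subv x o ∈ s2)) := by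
    induction (PySem.Set.ofList s1) with
    | nil => simp
    | cons a rest ih =>
      simp only [List.flatMap_cons, List.count_append, List.countP_cons, ih]
      rw [count_map_subv _ (PySem.Set.nodup_ofList s2) a o]
      by_cases hm : subv a o ∈ s2 <;>
        simp [hm, PySem.Set.mem_ofList] <;> omega
  rw [hB, hA]
  simp

-- A's nested loops equal find? on the flattened pair-order diff stream
lemma inner_eq_find (s1 s2 : List (Int × Int × Int)) (t : Int) (b1 : Int × Int × Int)
    (counts : PySem.Dict (Int × Int × Int) Int)
    (hc : ∀ o, (counts.getD o 0)
        = ((PySem.Set.inter (PySem.Set.ofList s1)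
            (PySem.Set.ofList (s2.map (fun b => addv b o)))).length : Int))
    (l : List (Int × Int × Int)) :
    findOffsetInner (PySem.Set.ofList s1) s2 t b1 l
      = ((l.map (fun b2 => subv b1 b2)).find? (fun v => decide (t ≤ counts.getD v 0))).map
          (fun o => (s2.map (fun b => addv b o), o)) := by
  induction l with
  | nil => rfl
  | cons b2 rest ih =>
    simp only [findOffsetInner, List.map_cons]
    have hfold : s2.foldl (fun acc b => acc ++ [offsetVector b (diffVector b1 b2)]) []
        = s2.map (fun b => addv b (subv b1 b2)) := by
      rw [PySem.List.foldl_append_singleton_eq_map]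
      simp only [List.nil_append]
      rfl
    rw [hfold]
    have hdo : diffVector b1 b2 = subv b1 b2 := rfl
    rw [hdo, ← hc (subv b1 b2)]
    by_cases h : t ≤ counts.getD (subv b1 b2) 0
    · rw [if_pos h, List.find?_cons_of_pos (by simpa using h)]
      rfl
    · rw [if_neg h, List.find?_cons_of_neg (by simpa using h)]
      exact ih

lemma outer_eq_find (s1 s2 : List (Int × Int × Int)) (t : Int)
    (counts : PySem.Dict (Int × Int × Int) Int)
    (hc : ∀ o, (counts.getD o 0)
        = ((PySem.Set.inter (PySem.Set.ofList s1)
            (PySem.Set.ofList (s2.map (fun b => addv b o)))).length : Int))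
    (l : List (Int × Int × Int)) :
    findOffsetOuter (PySem.Set.ofList s1) s2 t l
      = ((l.flatMap (fun a => s2.map (fun b => subv a b))).find?
          (fun v => decide (t ≤ counts.getD v 0))).map
          (fun o => (s2.map (fun b => addv b o), o)) := by
  induction l with
  | nil => rfl
  | cons b1 rest ih =>
    simp only [findOffsetOuter, List.flatMap_cons, List.find?_append,
      inner_eq_find s1 s2 t b1 counts hc s2]
    cases (s2.map (fun b2 => subv b1 b2)).find? (fun v => decide (t ≤ counts.getD v 0)) with
    | none => simpa using ih
    | some o => rfl

-- ===== VERDICT (by name: the statement is the Claim_ definition above) =====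
theorem findOffset_spec : Claim_equal_findOffset := by
  intro s1 s2 threshold _
  unfold Spec_findOffset findOffset findOffset_alt
  rw [outer_eq_find s1 s2 threshold _ (fun o => counts_getD_eq_overlap s1 s2 o) s1]
  cases hf : ((s1.flatMap (fun a => s2.map (fun b => subv a b))).find?
      (fun v => decide (threshold ≤
        (((PySem.Set.ofList s1).flatMap
          (fun a => (PySem.Set.ofList s2).map (fun b => subv a b))).foldl
          (fun d v => d.insert v (d.getD v 0 + 1)) PySem.Dict.empty).getD v 0))) with
  | none => simp [hf]
  | some o => simp [hf]
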